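-- pv_equiv track=rewrite | github.com/KaramDanialGit/LeetcodePractice | DatabricksQuestions/DatabricksQ3ArrayInts.py | difference_pairs
-- ===== SOURCE A (Python) =====
-- def difference_pairs(a, b):
--     results = []
--     min_len = min(len(a), len(b))
--
--     for i in range(min_len):
--         for j in range(i, min_len):
--             if a[i] - b[j] == a[j] - b[i]:
--                 results.append([i,j])
--     return results
-- ===== SOURCE B (Python) =====
-- def difference_pairs(a, b):
--     # Hash-group indices by a[k]+b[k] (the pair condition a[i]-b[j]==a[j]-b[i]
--     # is equivalent to a[i]+b[i]==a[j]+b[j]); then per i emit the same-key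
--     # indices j >= i, so only matching indices are scanned.
--     n = min(len(a), len(b))
--     groups = {}
--     for k in range(n):
--         groups.setdefault(a[k] + b[k], []).append(k)
--     out = []
--     for i in range(n):
--         for j in groups[a[i] + b[i]]:
--             if j >= i:
--                 out.append([i, j])
--     return out
-- ===== Notes on version B (the rewrite author's own statement) =====
-- stated objective: alternative
-- what changed: Replaced the double index scan testing a[i]-b[j]==a[j]-b[i] with a single-pass dict grouping indices by a[k]+b[k] (the pair condition is equivalent to equal sums), emitting per i the same-key indices j >= i.
import Mathlib
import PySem

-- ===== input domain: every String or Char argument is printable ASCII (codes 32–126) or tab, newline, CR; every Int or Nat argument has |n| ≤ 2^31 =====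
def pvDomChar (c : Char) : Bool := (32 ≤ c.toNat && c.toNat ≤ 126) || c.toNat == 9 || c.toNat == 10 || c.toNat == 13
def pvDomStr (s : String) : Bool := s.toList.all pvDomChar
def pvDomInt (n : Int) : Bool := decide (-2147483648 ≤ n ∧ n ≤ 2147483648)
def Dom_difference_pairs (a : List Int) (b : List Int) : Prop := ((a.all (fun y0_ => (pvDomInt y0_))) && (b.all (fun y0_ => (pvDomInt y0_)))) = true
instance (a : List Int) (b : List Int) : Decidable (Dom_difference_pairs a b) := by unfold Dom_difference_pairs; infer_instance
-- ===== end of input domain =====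

-- B groups indices by a[k]+b[k] in a dict and emits same-key j ≥ i per i
-- instead of A's double scan testing every pair; same return value, proved below.

-- ===== PORT A =====
-- a[i]/b[j]: every index used is 0 ≤ · < min len, so `getD · 0` is exact Python indexing here
def difference_pairs (a : List Int) (b : List Int) : List (List Int) :=
  let n := min a.length b.length
  (List.range n).foldl (fun results i =>
    (List.range' i (n - i)).foldl (fun results j =>
      if a.getD i 0 - b.getD j 0 = a.getD j 0 - b.getD i 0
      then results ++ [[(i : Int), (j : Int)]] else results) results) []

-- ===== PORT B =====
-- the grouping key a[k]+b[k] (indices in range, so getD is exact)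
def dpKey (a : List Int) (b : List Int) (k : Nat) : Int := a.getD k 0 + b.getD k 0

def difference_pairs_alt (a : List Int) (b : List Int) : List (List Int) :=
  let n := min a.length b.length
  -- groups.setdefault(a[k]+b[k], []).append(k)  ==  d[key] = d.get(key, []) + [k]
  let groups : PySem.Dict Int (List Nat) :=
    (List.range n).foldl (fun d k => d.modify (dpKey a b k) [] (· ++ [k])) PySem.Dict.empty
  (List.range n).foldl (fun out i =>
    (groups.getD (dpKey a b i) []).foldl (fun out j =>
      if i ≤ j then out ++ [[(i : Int), (j : Int)]] else out) out) []

-- ===== PRECONDITION & SPEC =====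
def Spec_difference_pairs (a : List Int) (b : List Int) (out : List (List Int)) : Prop := out = difference_pairs_alt a b
instance (a : List Int) (b : List Int) (out : List (List Int)) : Decidable (Spec_difference_pairs a b out) := by unfold Spec_difference_pairs; infer_instance

-- ===== CLAIM (what is proved, stated in full; the proofs are below) =====
def Claim_equal_difference_pairs : Prop := ∀ (a : List Int) (b : List Int), Dom_difference_pairs a b → Spec_difference_pairs a b (difference_pairs a b)

-- ===== LEMMAS AND PROOFS =====

-- the group stored under key c is exactly the indices k < n with dpKey k = c, in order
lemma dp_groups_getD (a b : List Int) (n : Nat) (c : Int) :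
    (((List.range n).foldl (fun d k => d.modify (dpKey a b k) [] (· ++ [k]))
        PySem.Dict.empty).getD c []) =
      (List.range n).filter (fun k => dpKey a b k == c) := by
  have h := PySem.Dict.getD_foldl_modify_append
      (l := (List.range n).map (fun k => (dpKey a b k, k))) (d := PySem.Dict.empty) (c := c)
  rw [List.foldl_map] at h
  simpa [List.filter_map, Function.comp_def, List.map_map] using h

-- the same-key j ≥ i list equals A's inner scan range, for i < n
lemma dp_inner_eq (a b : List Int) (n i : Nat) (hi : i < n) :
    (((List.range n).filter (fun k => dpKey a b k == dpKey a b i)).filter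
        (fun j => decide (i ≤ j))) =
      (List.range' i (n - i)).filter
        (fun j => decide (a.getD i 0 - b.getD j 0 = a.getD j 0 - b.getD i 0)) := by
  rw [List.filter_filter]
  have hsplit : List.range n = List.range' 0 i ++ List.range' i (n - i) := by
    have h2 : i + (n - i) = n := by omega
    have h3 := List.range'_append (s := 0) (m := i) (n := n - i) (step := 1)
    simp only [Nat.zero_add, Nat.one_mul, h2] at h3
    rw [List.range_eq_range', ← h3]
  rw [hsplit, List.filter_append]
  have h1 : (List.range' 0 i).filter
      (fun j => decide (i ≤ j) && (dpKey a b j == dpKey a b i)) = [] := by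
    rw [List.filter_eq_nil_iff]
    intro j hj
    have : j < i := by
      have := List.mem_range'_1.mp hj; omega
    simp [Nat.not_le.mpr this]
  rw [h1, List.nil_append]
  apply List.filter_congr
  intro j hj
  have hij : i ≤ j := by
    have := List.mem_range'_1.mp hj; omega
  simp only [hij, decide_true, Bool.true_and]
  have : (dpKey a b j = dpKey a b i) ↔
      (a.getD i 0 - b.getD j 0 = a.getD j 0 - b.getD i 0) := by
    unfold dpKey; omega
  by_cases h : dpKey a b j = dpKey a b i
  · have l1 : (dpKey a b j == dpKey a b i) = true := by simpa using h
    have l2 : decide (a.getD i 0 - b.getD j 0 = a.getD j 0 - b.getD i 0) = true :=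
      decide_eq_true (this.mp h)
    rw [l1, l2]
  · have l1 : (dpKey a b j == dpKey a b i) = false := by simpa using h
    have l2 : decide (a.getD i 0 - b.getD j 0 = a.getD j 0 - b.getD i 0) = false := by
      simpa using fun hc => h (this.mpr hc)
    rw [l1, l2]

-- ===== VERDICT (by name: the statement is the Claim_ definition above) =====
theorem difference_pairs_spec : Claim_equal_difference_pairs := by
  intro a b _
  unfold Spec_difference_pairs difference_pairs difference_pairs_alt
  set n := min a.length b.length with hn
  apply PySem.List.foldl_congr_mem'
  intro i hi acc
  rw [dp_groups_getD]
  rw [PySem.List.foldl_append_ite (p := fun j => i ≤ j)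
        (f := fun j => [(i : Int), (j : Int)]),
      PySem.List.foldl_append_ite
        (p := fun j => a.getD i 0 - b.getD j 0 = a.getD j 0 - b.getD i 0)
        (f := fun j => [(i : Int), (j : Int)])]
  rw [dp_inner_eq a b n i (List.mem_range.mp hi)]
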